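-- pv_equiv track=rewrite | github.com/artemmilov/NPD-QUAST | metrics.py | _get_sorted_inches_for_scan
-- ===== SOURCE A (Python) =====
-- def _get_sorted_inches_for_scan(tool_answers, scan):
--     sorted_answers = sorted(
--         [
--             [tool_answer[0], tool_answer[1]]
--             for tool_answer in tool_answers[scan]
--         ],
--         key=lambda ans: ans[1],
--     )
--     result = []
--     last_scan = None
--     for sorted_answer in sorted_answers:
--         if sorted_answer[1] == last_scan:
--             result[-1].append(sorted_answer[0])
--         else:
--             result.append([sorted_answer[0]])
--             last_scan = sorted_answer[1]
--     return result
-- ===== SOURCE B (Python) =====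
-- def _get_sorted_inches_for_scan(tool_answers, scan):
--     groups = {}
--     for ans in tool_answers[scan]:
--         groups.setdefault(ans[1], []).append(ans[0])
--     return [groups[key] for key in sorted(groups)]
-- ===== Notes on version B (the rewrite author's own statement) =====
-- stated objective: simpler
-- what changed: Replaces A's stable sort of all answer pairs followed by a consecutive-run scan with one grouping pass into an insertion-ordered dict keyed by ans[1], then sorting only the distinct keys and emitting the buckets.
import Mathlib
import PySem

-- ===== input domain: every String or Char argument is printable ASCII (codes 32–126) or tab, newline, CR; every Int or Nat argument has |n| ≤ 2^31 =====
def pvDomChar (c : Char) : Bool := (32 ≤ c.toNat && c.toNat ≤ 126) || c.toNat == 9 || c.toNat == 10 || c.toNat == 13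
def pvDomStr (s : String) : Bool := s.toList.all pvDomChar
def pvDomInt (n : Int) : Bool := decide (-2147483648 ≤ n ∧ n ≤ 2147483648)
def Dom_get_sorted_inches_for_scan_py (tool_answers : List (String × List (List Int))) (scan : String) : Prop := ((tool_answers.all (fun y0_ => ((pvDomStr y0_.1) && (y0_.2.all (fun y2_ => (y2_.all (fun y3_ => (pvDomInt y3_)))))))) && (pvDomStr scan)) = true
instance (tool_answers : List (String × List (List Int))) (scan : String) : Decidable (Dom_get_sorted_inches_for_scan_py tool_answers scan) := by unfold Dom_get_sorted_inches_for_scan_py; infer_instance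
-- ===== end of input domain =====

-- B replaces A's stable sort of all answer pairs + consecutive-run scan by one grouping
-- pass into an insertion-ordered dict keyed by ans[1], then sorts only the distinct keys.

-- ===== PORT A =====
def get_sorted_inches_for_scan_py (tool_answers : List (String × List (List Int))) (scan : String) : List (List Int) :=
  let answers := ((PySem.Dict.mk tool_answers).get? scan).getD []
  let sorted_answers :=
    PySem.List.sorted
      (answers.map (fun tool_answer =>
        [PySem.List.pyGetD tool_answer 0 0, PySem.List.pyGetD tool_answer 1 0]))
      (fun ans => PySem.List.pyGetD ans 1 0) false
  (sorted_answers.foldl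
    (fun (st : List (List Int) × Option Int) sorted_answer =>
      if some (PySem.List.pyGetD sorted_answer 1 0) = st.2 then
        (st.1.dropLast ++ [(st.1.getLast?.getD []) ++ [PySem.List.pyGetD sorted_answer 0 0]], st.2)
      else
        (st.1 ++ [[PySem.List.pyGetD sorted_answer 0 0]],
         some (PySem.List.pyGetD sorted_answer 1 0)))
    ([], none)).1

-- ===== PORT B =====
def get_sorted_inches_for_scan_py_alt (tool_answers : List (String × List (List Int))) (scan : String) : List (List Int) :=
  let groups := (((PySem.Dict.mk tool_answers).get? scan).getD []).foldl
    (fun d ans =>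
      d.modify (PySem.List.pyGetD ans 1 0) [] (fun g => g ++ [PySem.List.pyGetD ans 0 0]))
    PySem.Dict.empty
  (PySem.List.sorted groups.keys (fun k => k) false).map (fun key => groups.getD key [])

-- ===== PRECONDITION & SPEC =====
-- Pre_ excludes exactly the inputs where Python A raises: a KeyError when scan is not a key
-- of tool_answers, and an IndexError when some answer for scan has fewer than two entries.
def Pre_get_sorted_inches_for_scan_py (tool_answers : List (String × List (List Int))) (scan : String) : Prop :=
  (PySem.Dict.mk tool_answers).contains scan = true ∧
  ∀ ta ∈ ((PySem.Dict.mk tool_answers).get? scan).getD [], 2 ≤ ta.length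
instance (tool_answers : List (String × List (List Int))) (scan : String) : Decidable (Pre_get_sorted_inches_for_scan_py tool_answers scan) := by unfold Pre_get_sorted_inches_for_scan_py; infer_instance

def pvWitness_get_sorted_inches_for_scan_py : (List (String × List (List Int))) × String :=
  ([("s", [[1, 2], [3, 2], [0, 1]])], "s")

def Spec_get_sorted_inches_for_scan_py (tool_answers : List (String × List (List Int))) (scan : String) (out : List (List Int)) : Prop := out = get_sorted_inches_for_scan_py_alt tool_answers scan
instance (tool_answers : List (String × List (List Int))) (scan : String) (out : List (List Int)) : Decidable (Spec_get_sorted_inches_for_scan_py tool_answers scan out) := by unfold Spec_get_sorted_inches_for_scan_py; infer_instance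

-- ===== CLAIM (what is proved, stated in full; the proofs are below) =====
def Claim_equal_get_sorted_inches_for_scan_py : Prop := ∀ (tool_answers : List (String × List (List Int))) (scan : String), Dom_get_sorted_inches_for_scan_py tool_answers scan → Pre_get_sorted_inches_for_scan_py tool_answers scan → Spec_get_sorted_inches_for_scan_py tool_answers scan (get_sorted_inches_for_scan_py tool_answers scan)

-- ===== LEMMAS AND PROOFS =====

-- proof-only abbreviations (definitionally equal to the inline lambdas of the ports)
def pvKey (ans : List Int) : Int := PySem.List.pyGetD ans 1 0
def pvVal (ans : List Int) : Int := PySem.List.pyGetD ans 0 0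
def pvStep (st : List (List Int) × Option Int) (sorted_answer : List Int) : List (List Int) × Option Int :=
  if some (PySem.List.pyGetD sorted_answer 1 0) = st.2 then
    (st.1.dropLast ++ [(st.1.getLast?.getD []) ++ [PySem.List.pyGetD sorted_answer 0 0]], st.2)
  else
    (st.1 ++ [[PySem.List.pyGetD sorted_answer 0 0]],
     some (PySem.List.pyGetD sorted_answer 1 0))
def pvBodyB (d : PySem.Dict Int (List Int)) (ans : List Int) : PySem.Dict Int (List Int) :=
  d.modify (PySem.List.pyGetD ans 1 0) [] (fun g => g ++ [PySem.List.pyGetD ans 0 0])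

theorem pvKey_pair (a b : Int) : pvKey [a, b] = b := by
  simp [pvKey, PySem.List.pyGetD, PySem.List.pyGet?, PySem.List.pyIdx?]

theorem pvVal_pair (a b : Int) : pvVal [a, b] = a := by
  simp [pvVal, PySem.List.pyGetD, PySem.List.pyGet?, PySem.List.pyIdx?]

-- the A fold only ever touches the last group: any strictly earlier prefix is inert
theorem pv_prefix (ys : List (List Int)) :
    ∀ (acc st : List (List Int)) (last : Option Int), st ≠ [] →
      ys.foldl pvStep (acc ++ st, last)
        = (acc ++ (ys.foldl pvStep (st, last)).1, (ys.foldl pvStep (st, last)).2)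
      ∧ (ys.foldl pvStep (st, last)).1 ≠ [] := by
  induction ys with
  | nil => intro acc st last h; exact ⟨rfl, h⟩
  | cons y ys ih =>
    intro acc st last h
    simp only [List.foldl_cons]
    by_cases hc : some (PySem.List.pyGetD y 1 0) = last
    · have hstep : pvStep (acc ++ st, last) y
          = (acc ++ (pvStep (st, last) y).1, (pvStep (st, last) y).2) := by
        simp only [pvStep, hc, if_pos]
        rw [List.dropLast_append_of_ne_nil h, List.getLast?_append_of_ne_nil _ h]
        simp [List.append_assoc]
      rw [hstep]
      exact ih acc _ _ (by simp [pvStep, hc])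
    · have hstep : pvStep (acc ++ st, last) y
          = (acc ++ (pvStep (st, last) y).1, (pvStep (st, last) y).2) := by
        simp [pvStep, hc, List.append_assoc]
      rw [hstep]
      exact ih acc _ _ (by simp [pvStep, hc])

-- a run of answers sharing the current key is appended, one value at a time, to the open group
theorem pv_block (block : List (List Int)) :
    ∀ (g : List Int) (m : Int), (∀ a ∈ block, pvKey a = m) →
      block.foldl pvStep ([g], some m) = ([g ++ block.map pvVal], some m) := by
  induction block with
  | nil => intro g m h; simp
  | cons b bs ih =>
    intro g m h
    have hb : pvKey b = m := h b (by simp)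
    have hstep : pvStep ([g], some m) b = ([g ++ [pvVal b]], some m) := by
      simp [pvStep, pvKey, pvVal] at hb ⊢
      simp [hb]
    simp only [List.foldl_cons, hstep]
    rw [ih (g ++ [pvVal b]) m (fun a ha => h a (by simp [ha]))]
    simp

-- after the run of the minimal key m is dropped, every remaining key differs from m
theorem pv_drop_ne (l : List (List Int)) (m : Int) :
    l.Pairwise (fun a b => pvKey a ≤ pvKey b) → (∀ b ∈ l, m ≤ pvKey b) →
    ∀ a ∈ l.dropWhile (fun a => pvKey a == m), pvKey a ≠ m := by
  induction l with
  | nil => simp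
  | cons b t ih =>
    intro hpw hbd
    rw [List.dropWhile_cons]
    by_cases hb : pvKey b = m
    · simp only [hb, beq_self_eq_true, if_true]
      exact ih (List.pairwise_cons.mp hpw).2 (fun c hc => hbd c (by simp [hc]))
    · have : (pvKey b == m) = false := by simp [hb]
      simp only [this, Bool.false_eq_true, if_false]
      intro a ha
      have hmb : m < pvKey b := lt_of_le_of_ne (hbd b (by simp)) (fun e => hb e.symm)
      rcases List.mem_cons.mp ha with h1 | h1
      · exact h1 ▸ hb
      · exact ne_of_gt (lt_of_lt_of_le hmb ((List.pairwise_cons.mp hpw).1 a h1))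

-- characterization of A's grouping fold over a key-sorted list, against any strictly
-- increasing enumeration ks of its key set
theorem pv_main (n : Nat) :
    ∀ ys : List (List Int), ys.length ≤ n →
      ys.Pairwise (fun a b => pvKey a ≤ pvKey b) →
      ∀ ks : List Int, ks.Pairwise (· < ·) → (∀ x, x ∈ ks ↔ x ∈ ys.map pvKey) →
      (ys.foldl pvStep ([], none)).1
        = ks.map (fun k => (ys.filter (fun a => pvKey a == k)).map pvVal) := by
  induction n with
  | zero =>
    intro ys hlen _ ks _ hmem
    have hys : ys = [] := List.length_eq_zero_iff.mp (Nat.le_zero.mp hlen)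
    subst hys
    cases ks with
    | nil => rfl
    | cons k kt => exact absurd ((hmem k).mp (by simp)) (by simp)
  | succ n ih =>
    intro ys hlen hpw ks hks hmem
    cases ys with
    | nil =>
      cases ks with
      | nil => rfl
      | cons k kt => exact absurd ((hmem k).mp (by simp)) (by simp)
    | cons y ys' =>
      have hyb : ∀ a ∈ ys', pvKey y ≤ pvKey a := (List.pairwise_cons.mp hpw).1
      have hpw' : ys'.Pairwise (fun a b => pvKey a ≤ pvKey b) := (List.pairwise_cons.mp hpw).2
      have hsplit : ys'.takeWhile (fun a => pvKey a == pvKey y)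
          ++ ys'.dropWhile (fun a => pvKey a == pvKey y) = ys' := List.takeWhile_append_dropWhile
      have hblock : ∀ a ∈ ys'.takeWhile (fun a => pvKey a == pvKey y), pvKey a = pvKey y :=
        fun a ha => by simpa using List.mem_takeWhile_imp ha
      have hrest_sub : (ys'.dropWhile (fun a => pvKey a == pvKey y)).Sublist ys' :=
        List.dropWhile_sublist _
      have hrest_pw := hpw'.sublist hrest_sub
      have hrest_ne : ∀ a ∈ ys'.dropWhile (fun a => pvKey a == pvKey y), pvKey a ≠ pvKey y :=
        pv_drop_ne ys' (pvKey y) hpw' hyb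
      have hfirst : pvStep ([], none) y = ([[pvVal y]], some (pvKey y)) := by
        simp [pvStep, pvKey, pvVal]
      have h1 : (y :: ys').foldl pvStep ([], none)
          = (ys'.dropWhile (fun a => pvKey a == pvKey y)).foldl pvStep
              ([[pvVal y] ++ (ys'.takeWhile (fun a => pvKey a == pvKey y)).map pvVal],
               some (pvKey y)) := by
        rw [List.foldl_cons, hfirst]
        conv_lhs => rw [← hsplit]
        rw [List.foldl_append, pv_block _ _ _ hblock]
      -- ks starts with pvKey y
      have hk0 : ∃ kt, ks = pvKey y :: kt := by
        have hmy : pvKey y ∈ ks := (hmem (pvKey y)).mpr (by simp)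
        cases ks with
        | nil => exact absurd hmy (by simp)
        | cons k0 kt =>
          have hk0mem : k0 ∈ (y :: ys').map pvKey := (hmem k0).mp (by simp)
          have hyk0 : pvKey y ≤ k0 := by
            rcases List.mem_map.mp hk0mem with ⟨a, ha, hka⟩
            rcases List.mem_cons.mp ha with h2 | h2
            · exact le_of_eq (by rw [h2] at hka; exact hka)
            · exact hka ▸ hyb a h2
          rcases List.mem_cons.mp hmy with h2 | h2
          · exact ⟨kt, by rw [h2]⟩
          · exact absurd ((List.pairwise_cons.mp hks).1 _ h2)
              (not_lt_of_ge hyk0)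
      rcases hk0 with ⟨kt, rfl⟩
      have hktpw : kt.Pairwise (· < ·) := (List.pairwise_cons.mp hks).2
      have hkt_lt : ∀ x ∈ kt, pvKey y < x := (List.pairwise_cons.mp hks).1
      have hktmem : ∀ x, x ∈ kt ↔ x ∈ (ys'.dropWhile (fun a => pvKey a == pvKey y)).map pvKey := by
        intro x
        constructor
        · intro hx
          have hxks : x ∈ (y :: ys').map pvKey := (hmem x).mp (by simp [hx])
          have hxny : x ≠ pvKey y := ne_of_gt (hkt_lt x hx)
          rcases List.mem_map.mp hxks with ⟨a, ha, hka⟩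
          rcases List.mem_cons.mp ha with h2 | h2
          · exact absurd (by rw [h2] at hka; exact hka.symm) hxny
          · rw [← hsplit] at h2
            rcases List.mem_append.mp h2 with h3 | h3
            · exact absurd (hka ▸ hblock a h3) hxny
            · exact List.mem_map.mpr ⟨a, h3, hka⟩
        · intro hx
          rcases List.mem_map.mp hx with ⟨a, ha, hka⟩
          have hxks : x ∈ pvKey y :: kt :=
            (hmem x).mpr (List.mem_map.mpr ⟨a, by simp [hrest_sub.subset ha], hka⟩)
          rcases List.mem_cons.mp hxks with h2 | h2
          · exact absurd (hka.trans h2) (hrest_ne a ha)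
          · exact h2
      -- head group of the result
      have hfilter_y : ((y :: ys').filter (fun a => pvKey a == pvKey y)).map pvVal
          = [pvVal y] ++ (ys'.takeWhile (fun a => pvKey a == pvKey y)).map pvVal := by
        rw [List.filter_cons, ← hsplit, List.filter_append]
        have ht : (ys'.takeWhile (fun a => pvKey a == pvKey y)).filter
            (fun a => pvKey a == pvKey y) = ys'.takeWhile (fun a => pvKey a == pvKey y) :=
          List.filter_eq_self.mpr (fun a ha => by simp [hblock a ha])
        have hd : (ys'.dropWhile (fun a => pvKey a == pvKey y)).filter
            (fun a => pvKey a == pvKey y) = [] :=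
          List.filter_eq_nil_iff.mpr (fun a ha => by simp [hrest_ne a ha])
        simp [ht, hd]
      -- tail groups: filtering (y :: ys') at a key of kt is filtering the rest
      have hfilter_kt : ∀ k ∈ kt,
          (y :: ys').filter (fun a => pvKey a == k)
            = (ys'.dropWhile (fun a => pvKey a == pvKey y)).filter (fun a => pvKey a == k) := by
        intro k hk
        have hkny : pvKey y ≠ k := ne_of_lt (hkt_lt k hk)
        rw [List.filter_cons, ← hsplit, List.filter_append]
        have ht : (ys'.takeWhile (fun a => pvKey a == pvKey y)).filter
            (fun a => pvKey a == k) = [] :=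
          List.filter_eq_nil_iff.mpr (fun a ha => by simp [hblock a ha, hkny])
        simp [ht, hkny]
      cases hrest : ys'.dropWhile (fun a => pvKey a == pvKey y) with
      | nil =>
        have hkt : kt = [] := by
          cases kt with
          | nil => rfl
          | cons k2 kt2 => exact absurd ((hktmem k2).mp (by simp)) (by simp [hrest])
        subst hkt
        rw [h1, hrest]
        simp only [List.foldl_nil, List.map_cons, List.map_nil]
        rw [hfilter_y]
      | cons r rt =>
        have hr_ne : pvKey r ≠ pvKey y := hrest_ne r (by rw [hrest]; simp)
        have h2 : pvStep ([[pvVal y] ++ (ys'.takeWhile (fun a => pvKey a == pvKey y)).map pvVal],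
              some (pvKey y)) r
            = ([[pvVal y] ++ (ys'.takeWhile (fun a => pvKey a == pvKey y)).map pvVal]
                ++ [[pvVal r]], some (pvKey r)) := by
          have hr_ne' : ¬ (PySem.List.pyGetD r 1 0 = PySem.List.pyGetD y 1 0) := hr_ne
          simp [pvStep, pvKey, pvVal, hr_ne']
        have h3 : pvStep ([], none) r = ([[pvVal r]], some (pvKey r)) := by
          simp [pvStep, pvKey, pvVal]
        have hsl : (r :: rt).length ≤ ys'.length := by
          rw [← hrest]; exact hrest_sub.length_le
        have hlen' : (r :: rt).length ≤ n := by
          simp only [List.length_cons] at hlen hsl ⊢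
          omega
        have hih := ih (r :: rt) hlen' (hrest ▸ hrest_pw) kt hktpw
          (fun x => (hktmem x).trans (by rw [hrest]))
        rw [h1, hrest, List.foldl_cons, h2]
        rcases pv_prefix rt [[pvVal y] ++ (ys'.takeWhile (fun a => pvKey a == pvKey y)).map pvVal]
          [[pvVal r]] (some (pvKey r)) (by simp) with ⟨hpref, _⟩
        rw [hpref]
        have hrt : (rt.foldl pvStep ([[pvVal r]], some (pvKey r))).1
            = kt.map (fun k => (((r :: rt).filter (fun a => pvKey a == k)).map pvVal)) := by
          rw [← hih, List.foldl_cons, h3]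
        rw [hrt]
        simp only [List.map_cons]
        rw [hfilter_y]
        have : kt.map (fun k => (((r :: rt).filter (fun a => pvKey a == k)).map pvVal))
            = kt.map (fun k => (((y :: ys').filter (fun a => pvKey a == k)).map pvVal)) := by
          apply List.map_congr_left
          intro k hk
          rw [hfilter_kt k hk, hrest]
        rw [this]
        rfl

-- stability of Python's sort: inserting x never reorders equal keys
theorem pv_filter_insertBy (ys : List (List Int)) (x : List Int) (k : Int)
    (h : ys.Pairwise (fun a b => pvKey a ≤ pvKey b)) :
    (PySem.List.insertBy (fun a b => decide (pvKey a < pvKey b)) x ys).filter (fun a => pvKey a == k)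
      = ys.filter (fun a => pvKey a == k) ++ (if pvKey x = k then [x] else []) := by
  induction ys with
  | nil =>
    by_cases hk : pvKey x = k <;> simp [PySem.List.insertBy, hk]
  | cons y ys ih =>
    have hpw := (List.pairwise_cons.mp h).1
    have htl := (List.pairwise_cons.mp h).2
    show (if decide (pvKey x < pvKey y) = true then x :: y :: ys
          else y :: PySem.List.insertBy (fun a b => decide (pvKey a < pvKey b)) x ys).filter
            (fun a => pvKey a == k) = _
    by_cases hlt : pvKey x < pvKey y
    · simp only [hlt, decide_true, if_pos]
      by_cases hk : pvKey x = k
      · have hnil : (y :: ys).filter (fun a => pvKey a == k) = [] := by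
          apply List.filter_eq_nil_iff.mpr
          intro a ha
          have : pvKey y ≤ pvKey a := by
            rcases List.mem_cons.mp ha with h1 | h1
            · exact le_of_eq (h1 ▸ rfl)
            · exact hpw a h1
          have : k < pvKey a := lt_of_lt_of_le (hk ▸ hlt) this
          simp [ne_of_gt this]
        simp [hnil, hk]
      · simp [hk]
    · simp only [hlt, decide_false, if_neg, Bool.false_eq_true, not_false_iff]
      simp only [List.filter_cons]
      rw [ih htl]
      by_cases hy : pvKey y == k <;> simp [hy]

theorem pv_sorted_filter (xs : List (List Int)) (k : Int) :
    (PySem.List.sorted xs pvKey false).filter (fun a => pvKey a == k)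
      = xs.filter (fun a => pvKey a == k) := by
  induction xs using List.reverseRecOn with
  | nil => simp [PySem.List.sorted]
  | append_singleton xs x ih =>
    rw [PySem.List.sorted_eq_foldl_insertBy, List.foldl_append]
    rw [← PySem.List.sorted_eq_foldl_insertBy xs pvKey]
    simp only [List.foldl_cons, List.foldl_nil]
    rw [pv_filter_insertBy _ x k (PySem.List.sorted_pairwise xs pvKey), ih]
    by_cases hk : pvKey x = k <;> simp [hk]

-- B's grouping dict: lookup of a key is the in-order list of that key's values
theorem pv_getD (answers : List (List Int)) :
    ∀ (d : PySem.Dict Int (List Int)) (k : Int),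
      (answers.foldl pvBodyB d).getD k []
        = d.getD k [] ++ (answers.filter (fun a => pvKey a == k)).map pvVal := by
  induction answers with
  | nil => intro d k; simp
  | cons a as ih =>
    intro d k
    simp only [List.foldl_cons, List.filter_cons]
    rw [ih]
    by_cases hk : pvKey a = k
    · have hbeq : (pvKey a == k) = true := by simp [hk]
      rw [hbeq]
      simp only [pvBodyB]
      rw [show PySem.List.pyGetD a 1 0 = pvKey a from rfl, hk]
      rw [PySem.Dict.getD_modify_self]
      simp [pvVal]
    · have hbeq : (pvKey a == k) = false := by simp [hk]
      rw [hbeq]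
      simp only [pvBodyB]
      rw [show PySem.List.pyGetD a 1 0 = pvKey a from rfl]
      rw [PySem.Dict.getD_modify_of_ne _ _ _ (fun hkk => hk (Eq.symm hkk))]
      simp

theorem pv_keys (answers : List (List Int)) :
    ∀ d : PySem.Dict Int (List Int),
      (answers.foldl pvBodyB d).keys = PySem.Set.update d.keys (answers.map pvKey) := by
  induction answers with
  | nil => intro d; simp [PySem.Set.update]
  | cons a as ih =>
    intro d
    simp only [List.foldl_cons, List.map_cons]
    rw [ih]
    have hkeys : (pvBodyB d a).keys = PySem.Set.add d.keys (pvKey a) := by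
      unfold pvBodyB PySem.Dict.modify
      rw [show PySem.List.pyGetD a 1 0 = pvKey a from rfl]
      by_cases hc : d.contains (pvKey a) = true
      · rw [PySem.Dict.keys_insert_of_contains _ _ hc]
        have hm : pvKey a ∈ d.keys := (PySem.Dict.contains_iff_mem_keys d (pvKey a)).mp hc
        simp [PySem.Set.add, hm]
      · rw [PySem.Dict.keys_insert_of_not_contains _ _ (by simpa using hc)]
        have hm : pvKey a ∉ d.keys := fun hm =>
          hc ((PySem.Dict.contains_iff_mem_keys d (pvKey a)).mpr hm)
        simp [PySem.Set.add, hm]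
    rw [hkeys]
    rfl

-- the whole pipeline, for an arbitrary list of answers
theorem pv_core (answers : List (List Int)) :
    (((PySem.List.sorted
        (answers.map (fun ta => [PySem.List.pyGetD ta 0 0, PySem.List.pyGetD ta 1 0]))
        (fun ans => PySem.List.pyGetD ans 1 0) false).foldl pvStep ([], none)).1)
      = (PySem.List.sorted (answers.foldl pvBodyB PySem.Dict.empty).keys (fun k => k) false).map
          (fun key => (answers.foldl pvBodyB PySem.Dict.empty).getD key []) := by
  have hkey : (fun ans => PySem.List.pyGetD ans 1 0) = pvKey := rfl
  rw [hkey]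
  rw [pv_keys answers PySem.Dict.empty]
  have hupd : PySem.Set.update (PySem.Dict.empty : PySem.Dict Int (List Int)).keys
      (answers.map pvKey) = PySem.Set.ofList (answers.map pvKey) := by
    rw [PySem.Dict.keys_empty, PySem.Set.ofList_eq_foldl]; rfl
  rw [hupd]
  have hpw := PySem.List.sorted_pairwise
    (answers.map (fun ta => [PySem.List.pyGetD ta 0 0, PySem.List.pyGetD ta 1 0])) pvKey
  have hks := PySem.List.sorted_ofList_pairwise_lt (answers.map pvKey)
  have hmem : ∀ x : Int,
      x ∈ PySem.List.sorted (PySem.Set.ofList (answers.map pvKey)) (fun k => k) false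
      ↔ x ∈ (PySem.List.sorted
          (answers.map (fun ta => [PySem.List.pyGetD ta 0 0, PySem.List.pyGetD ta 1 0]))
          pvKey false).map pvKey := by
    intro x
    rw [PySem.List.mem_sorted, PySem.Set.mem_ofList]
    constructor
    · intro hx
      rcases List.mem_map.mp hx with ⟨ta, hta, rfl⟩
      exact List.mem_map.mpr ⟨[PySem.List.pyGetD ta 0 0, PySem.List.pyGetD ta 1 0],
        (PySem.List.mem_sorted _ _ _ _).mpr (List.mem_map.mpr ⟨ta, hta, rfl⟩),
        pvKey_pair _ _⟩
    · intro hx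
      rcases List.mem_map.mp hx with ⟨p, hp, rfl⟩
      rcases List.mem_map.mp ((PySem.List.mem_sorted _ _ _ _).mp hp) with ⟨ta, hta, rfl⟩
      rw [pvKey_pair]
      exact List.mem_map.mpr ⟨ta, hta, rfl⟩
  rw [pv_main (PySem.List.sorted
        (answers.map (fun ta => [PySem.List.pyGetD ta 0 0, PySem.List.pyGetD ta 1 0]))
        pvKey false).length _ le_rfl hpw _ hks hmem]
  apply List.map_congr_left
  intro k _
  rw [pv_sorted_filter, List.filter_map, List.map_map]
  rw [pv_getD answers PySem.Dict.empty k, PySem.Dict.getD_empty]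
  have h1 : ((fun a => pvKey a == k) ∘
      (fun ta => [PySem.List.pyGetD ta 0 0, PySem.List.pyGetD ta 1 0]))
      = (fun ta => pvKey ta == k) := by
    funext ta
    show (pvKey [PySem.List.pyGetD ta 0 0, PySem.List.pyGetD ta 1 0] == k) = _
    rw [pvKey_pair]
    rfl
  have h2 : (pvVal ∘ (fun ta => [PySem.List.pyGetD ta 0 0, PySem.List.pyGetD ta 1 0]))
      = pvVal := by
    funext ta
    show pvVal [PySem.List.pyGetD ta 0 0, PySem.List.pyGetD ta 1 0] = _
    rw [pvVal_pair]
    rfl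
  rw [h1, h2]
  rw [List.nil_append]

-- ===== VERDICT (by name: the statement is the Claim_ definition above) =====
theorem get_sorted_inches_for_scan_py_spec : Claim_equal_get_sorted_inches_for_scan_py := by
  intro tool_answers scan _ _
  unfold Spec_get_sorted_inches_for_scan_py
  unfold get_sorted_inches_for_scan_py get_sorted_inches_for_scan_py_alt
  exact pv_core _
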